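-- pv_equiv track=rewrite | github.com/jeffcampbell/game-a-day | tools/session-insight-summarizer.py | extract_button_heatmap
-- ===== SOURCE A (Python) =====
-- def extract_button_heatmap(button_sequence):
--     """Extract button press counts from button sequence.
--
--     Button encoding: bit 0=left, bit 1=right, bit 2=up, bit 3=down, bit 4=o, bit 5=x
--
--     Returns dict of button_name -> count.
--     """
--     buttons = {
--         'left': 0,
--         'right': 0,
--         'up': 0,
--         'down': 0,
--         'o_button': 0,
--         'x_button': 0,
--     }
--
--     for btn_state in button_sequence:
--         if not isinstance(btn_state, int):
--             continue
--
--         if btn_state & 1:  # bit 0 = left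
--             buttons['left'] += 1
--         if btn_state & 2:  # bit 1 = right
--             buttons['right'] += 1
--         if btn_state & 4:  # bit 2 = up
--             buttons['up'] += 1
--         if btn_state & 8:  # bit 3 = down
--             buttons['down'] += 1
--         if btn_state & 16:  # bit 4 = o button
--             buttons['o_button'] += 1
--         if btn_state & 32:  # bit 5 = x button
--             buttons['x_button'] += 1
--
--     return buttons
-- ===== SOURCE B (Python) =====
-- def extract_button_heatmap(button_sequence):
--     """Extract button press counts from button sequence.
--
--     One independent counting pass per button (outer loop over buttons,
--     inner scan over the sequence) instead of one pass with six branches.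
--     """
--     button_masks = {
--         'left': 1,
--         'right': 2,
--         'up': 4,
--         'down': 8,
--         'o_button': 16,
--         'x_button': 32,
--     }
--     return {
--         name: sum(1 for b in button_sequence if isinstance(b, int) and b & mask)
--         for name, mask in button_masks.items()
--     }
-- ===== Notes on version B (the rewrite author's own statement) =====
-- stated objective: alternative
-- what changed: Loop interchange: instead of one pass over the sequence updating six dict counters via bit-test branches, B computes each button's count independently with a separate bit-mask scan (a dict comprehension over a name->mask table).
import Mathlib
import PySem

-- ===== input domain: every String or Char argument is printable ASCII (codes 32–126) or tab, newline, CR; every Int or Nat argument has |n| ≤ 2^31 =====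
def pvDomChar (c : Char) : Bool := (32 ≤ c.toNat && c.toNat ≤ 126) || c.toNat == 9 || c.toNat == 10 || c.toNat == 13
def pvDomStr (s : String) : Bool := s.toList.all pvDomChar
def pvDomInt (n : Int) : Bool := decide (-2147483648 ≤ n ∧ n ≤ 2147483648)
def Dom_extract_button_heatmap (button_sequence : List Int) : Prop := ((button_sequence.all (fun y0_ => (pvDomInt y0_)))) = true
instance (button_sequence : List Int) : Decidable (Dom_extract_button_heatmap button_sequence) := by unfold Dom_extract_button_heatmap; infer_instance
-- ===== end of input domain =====

-- B replaces A's single pass with six branched dict-counter updates by one independent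
-- bit-mask counting scan per button (loop interchange); same cost class, no speed claim.

-- ===== PORT A =====
-- loop body of A's for-loop: six conditional `buttons[k] += 1` updates
-- (the isinstance(btn_state, int) guard is always true on List Int, so the
--  `continue` branch is unreachable and the loop body runs on every element)
def pvStepA (d : PySem.Dict String Int) (btn_state : Int) : PySem.Dict String Int :=
  let d := if PySem.Int.band btn_state 1 ≠ 0 then d.modify "left" 0 (· + 1) else d
  let d := if PySem.Int.band btn_state 2 ≠ 0 then d.modify "right" 0 (· + 1) else d
  let d := if PySem.Int.band btn_state 4 ≠ 0 then d.modify "up" 0 (· + 1) else d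
  let d := if PySem.Int.band btn_state 8 ≠ 0 then d.modify "down" 0 (· + 1) else d
  let d := if PySem.Int.band btn_state 16 ≠ 0 then d.modify "o_button" 0 (· + 1) else d
  if PySem.Int.band btn_state 32 ≠ 0 then d.modify "x_button" 0 (· + 1) else d

def extract_button_heatmap (button_sequence : List Int) : List (String × Int) :=
  let buttons : PySem.Dict String Int :=
    PySem.Dict.ofList [("left", 0), ("right", 0), ("up", 0), ("down", 0), ("o_button", 0), ("x_button", 0)]
  (button_sequence.foldl pvStepA buttons).items

-- ===== PORT B =====
def pvButtonMasks : List (String × Int) :=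
  [("left", 1), ("right", 2), ("up", 4), ("down", 8), ("o_button", 16), ("x_button", 32)]

-- isinstance(b, int) is always true on List Int; sum(1 for b … if b & mask) is countP
def extract_button_heatmap_alt (button_sequence : List Int) : List (String × Int) :=
  pvButtonMasks.map (fun nm =>
    (nm.1, (button_sequence.countP (fun b => PySem.Int.band b nm.2 != 0) : Int)))

-- ===== PRECONDITION & SPEC =====
def Spec_extract_button_heatmap (button_sequence : List Int) (out : List (String × Int)) : Prop := out = extract_button_heatmap_alt button_sequence
instance (button_sequence : List Int) (out : List (String × Int)) : Decidable (Spec_extract_button_heatmap button_sequence out) := by unfold Spec_extract_button_heatmap; infer_instance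

-- ===== CLAIM (what is proved, stated in full; the proofs are below) =====
def Claim_equal_extract_button_heatmap : Prop := ∀ (button_sequence : List Int), Dom_extract_button_heatmap button_sequence → Spec_extract_button_heatmap button_sequence (extract_button_heatmap button_sequence)

-- ===== LEMMAS AND PROOFS =====
def pvK6 : List String := ["left", "right", "up", "down", "o_button", "x_button"]

def pvD0 : PySem.Dict String Int :=
  PySem.Dict.ofList [("left", 0), ("right", 0), ("up", 0), ("down", 0), ("o_button", 0), ("x_button", 0)]

def pvCnt (m : Int) (l : List Int) : Int :=
  (l.countP (fun b => PySem.Int.band b m != 0) : Int)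

theorem pvCnt_cons (m b : Int) (l : List Int) :
    pvCnt m (b :: l) = pvCnt m l + (if PySem.Int.band b m ≠ 0 then 1 else 0) := by
  by_cases h : PySem.Int.band b m = 0 <;>
    simp [pvCnt, h]

theorem pv_keys_if_modify (c : Prop) [Decidable c] (d : PySem.Dict String Int)
    (k : String) (d0 : Int) (f : Int → Int) (h : d.keys = pvK6) (hk : k ∈ pvK6) :
    (if c then d.modify k d0 f else d).keys = pvK6 := by
  have hc : d.contains k = true := by
    rw [PySem.Dict.contains_eq_decide_mem_keys, h]; simpa using hk
  split
  · simp [PySem.Dict.keys_modify, PySem.Dict.keys_insert_of_contains, hc, h]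
  · exact h

theorem pv_step_keys (d : PySem.Dict String Int) (x : Int) (h : d.keys = pvK6) :
    (pvStepA d x).keys = pvK6 := by
  simp only [pvStepA]
  exact pv_keys_if_modify _ _ _ _ _
    (pv_keys_if_modify _ _ _ _ _
      (pv_keys_if_modify _ _ _ _ _
        (pv_keys_if_modify _ _ _ _ _
          (pv_keys_if_modify _ _ _ _ _
            (pv_keys_if_modify _ _ _ _ _ h (by decide)) (by decide)) (by decide))
        (by decide)) (by decide)) (by decide)

theorem pv_fold_keys (l : List Int) : ∀ d : PySem.Dict String Int, d.keys = pvK6 →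
    (l.foldl pvStepA d).keys = pvK6 := by
  induction l with
  | nil => intro d h; simpa using h
  | cons x xs ih => intro d h; rw [List.foldl_cons]; exact ih _ (pv_step_keys d x h)

theorem pv_step_getD_left (d : PySem.Dict String Int) (x : Int) :
    (pvStepA d x).getD "left" 0 = d.getD "left" 0 + (if PySem.Int.band x 1 ≠ 0 then 1 else 0) := by
  simp only [pvStepA]
  split_ifs <;> simp [PySem.Dict.getD_modify]

theorem pv_step_getD_right (d : PySem.Dict String Int) (x : Int) :
    (pvStepA d x).getD "right" 0 = d.getD "right" 0 + (if PySem.Int.band x 2 ≠ 0 then 1 else 0) := by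
  simp only [pvStepA]
  split_ifs <;> simp [PySem.Dict.getD_modify]

theorem pv_step_getD_up (d : PySem.Dict String Int) (x : Int) :
    (pvStepA d x).getD "up" 0 = d.getD "up" 0 + (if PySem.Int.band x 4 ≠ 0 then 1 else 0) := by
  simp only [pvStepA]
  split_ifs <;> simp [PySem.Dict.getD_modify]

theorem pv_step_getD_down (d : PySem.Dict String Int) (x : Int) :
    (pvStepA d x).getD "down" 0 = d.getD "down" 0 + (if PySem.Int.band x 8 ≠ 0 then 1 else 0) := by
  simp only [pvStepA]
  split_ifs <;> simp [PySem.Dict.getD_modify]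

theorem pv_step_getD_o (d : PySem.Dict String Int) (x : Int) :
    (pvStepA d x).getD "o_button" 0 = d.getD "o_button" 0 + (if PySem.Int.band x 16 ≠ 0 then 1 else 0) := by
  simp only [pvStepA]
  split_ifs <;> simp [PySem.Dict.getD_modify]

theorem pv_step_getD_x (d : PySem.Dict String Int) (x : Int) :
    (pvStepA d x).getD "x_button" 0 = d.getD "x_button" 0 + (if PySem.Int.band x 32 ≠ 0 then 1 else 0) := by
  simp only [pvStepA]
  split_ifs <;> simp [PySem.Dict.getD_modify]

theorem pv_fold_getD (k : String) (m : Int)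
    (hstep : ∀ d x, (pvStepA d x).getD k 0 = d.getD k 0 + (if PySem.Int.band x m ≠ 0 then 1 else 0))
    (l : List Int) : ∀ d : PySem.Dict String Int,
    (l.foldl pvStepA d).getD k 0 = d.getD k 0 + pvCnt m l := by
  induction l with
  | nil => intro d; simp [pvCnt]
  | cons x xs ih =>
      intro d
      rw [List.foldl_cons, ih, hstep, pvCnt_cons]
      ring

theorem pv_main (l : List Int) : extract_button_heatmap l =
    [("left", pvCnt 1 l), ("right", pvCnt 2 l), ("up", pvCnt 4 l),
     ("down", pvCnt 8 l), ("o_button", pvCnt 16 l), ("x_button", pvCnt 32 l)] := by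
  show (List.foldl pvStepA pvD0 l).items = _
  have hk : (List.foldl pvStepA pvD0 l).keys = pvK6 := pv_fold_keys l pvD0 (by decide)
  have hnd : (List.foldl pvStepA pvD0 l).keys.Nodup := by rw [hk]; decide
  rw [PySem.Dict.items_eq_map_keys _ hnd 0, hk]
  simp only [pvK6, List.map_cons, List.map_nil]
  rw [pv_fold_getD "left" 1 pv_step_getD_left l,
      pv_fold_getD "right" 2 pv_step_getD_right l,
      pv_fold_getD "up" 4 pv_step_getD_up l,
      pv_fold_getD "down" 8 pv_step_getD_down l,
      pv_fold_getD "o_button" 16 pv_step_getD_o l,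
      pv_fold_getD "x_button" 32 pv_step_getD_x l]
  norm_num [show pvD0.getD "left" 0 = 0 from by decide,
            show pvD0.getD "right" 0 = 0 from by decide,
            show pvD0.getD "up" 0 = 0 from by decide,
            show pvD0.getD "down" 0 = 0 from by decide,
            show pvD0.getD "o_button" 0 = 0 from by decide,
            show pvD0.getD "x_button" 0 = 0 from by decide]

theorem pv_alt (l : List Int) : extract_button_heatmap_alt l =
    [("left", pvCnt 1 l), ("right", pvCnt 2 l), ("up", pvCnt 4 l),
     ("down", pvCnt 8 l), ("o_button", pvCnt 16 l), ("x_button", pvCnt 32 l)] := by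
  simp [extract_button_heatmap_alt, pvButtonMasks, pvCnt]

-- ===== VERDICT (by name: the statement is the Claim_ definition above) =====
theorem extract_button_heatmap_spec : Claim_equal_extract_button_heatmap := by
  intro l _
  unfold Spec_extract_button_heatmap
  rw [pv_main, pv_alt]
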